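-- pv_equiv track=rewrite | github.com/Fionn88/ccClub-Practice | judge/1111HW0202.py | selectMale
-- ===== SOURCE A (Python) =====
-- def selectMale(point, participate_information):
--     if not point:
--         return None
--
--     maxPoint = 0
--     people = []
--     for key,value in point.items():
--         if participate_information.get(key).get("Gender") == "M":
--             if maxPoint < value:
--                 maxPoint = value
--     if maxPoint == 0:
--         return None
--     for key,value in point.items():
--         if value != maxPoint:
--             continue
--         elif participate_information.get(key).get("Gender") == "M":
--             people.append(key)
--
--     if people:
--         people = sorted(people)
--         return '-'.join(people)
--     else:
--         return None
-- ===== SOURCE B (Python) =====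
-- # B: one running-max pass with reset replaces A's two sequential passes (objective: simpler).
-- def selectMale(point, participate_information):
--     maxPoint = 0
--     people = []
--     for key, value in point.items():
--         if participate_information.get(key).get("Gender") == "M":
--             if maxPoint < value:
--                 maxPoint = value
--                 people = [key]
--             elif value == maxPoint:
--                 people.append(key)
--     if maxPoint == 0 or not people:
--         return None
--     return '-'.join(sorted(people))
-- ===== Notes on version B (the rewrite author's own statement) =====
-- stated objective: simpler
-- what changed: B replaces A's two sequential passes (first compute the male maximum, then re-scan to collect the names) by a single running-max-with-reset pass that maintains the tied name list as it goes, dropping A's separate empty-dict early return.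
import Mathlib
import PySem

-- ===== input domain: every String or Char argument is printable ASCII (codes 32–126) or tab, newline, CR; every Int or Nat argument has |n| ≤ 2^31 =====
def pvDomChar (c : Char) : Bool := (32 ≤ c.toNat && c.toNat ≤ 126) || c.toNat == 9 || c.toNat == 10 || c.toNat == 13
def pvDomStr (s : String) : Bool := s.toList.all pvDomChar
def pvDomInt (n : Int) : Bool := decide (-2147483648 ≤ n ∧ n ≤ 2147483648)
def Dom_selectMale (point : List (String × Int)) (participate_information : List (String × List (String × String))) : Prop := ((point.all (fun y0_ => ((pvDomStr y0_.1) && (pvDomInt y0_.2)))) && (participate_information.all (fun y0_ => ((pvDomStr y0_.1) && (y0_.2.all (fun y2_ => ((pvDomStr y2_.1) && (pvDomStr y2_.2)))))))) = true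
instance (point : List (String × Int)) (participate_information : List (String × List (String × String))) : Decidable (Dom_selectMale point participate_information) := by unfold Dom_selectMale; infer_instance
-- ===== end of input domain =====

-- B merges A's two passes (male max, then collect ties) into one running-max-with-reset pass; objective: simpler.


-- ===== PORT A =====
-- participate_information.get(key).get("Gender") == "M"  (first-match assoc lookup; missing outer key,
-- where Python raises AttributeError, yields false here and is excluded by Pre_)
def pvGenderIsM (participate_information : List (String × List (String × String))) (key : String) : Bool :=
  ((participate_information.lookup key).bind (fun d => d.lookup "Gender")) == some "M"

-- A's first loop: for key,value in point.items(): if gender == "M" and maxPoint < value: maxPoint = value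
def pvMaxLoopA (pi_ : List (String × List (String × String))) : List (String × Int) → Int → Int
  | [], m => m
  | (k, v) :: t, m => pvMaxLoopA pi_ t (if pvGenderIsM pi_ k then (if m < v then v else m) else m)

-- A's second loop: collect keys with value == maxPoint and gender == "M"
def pvPeopleLoopA (pi_ : List (String × List (String × String))) (M : Int) : List (String × Int) → List String → List String
  | [], acc => acc
  | (k, v) :: t, acc =>
      pvPeopleLoopA pi_ M t (if v ≠ M then acc else if pvGenderIsM pi_ k then acc ++ [k] else acc)

def selectMale (point : List (String × Int)) (participate_information : List (String × List (String × String))) : Option String :=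
  if point = [] then none
  else
    let maxPoint := pvMaxLoopA participate_information point 0
    if maxPoint = 0 then none
    else
      let people := pvPeopleLoopA participate_information maxPoint point []
      if people ≠ [] then some (PySem.Str.join "-" (PySem.List.sorted people (fun x => x) false))
      else none

-- ===== PORT B =====
-- B's single loop: running max with reset of the tied-name list
def pvLoopB (pi_ : List (String × List (String × String))) : List (String × Int) → Int × List String → Int × List String
  | [], s => s
  | (k, v) :: t, (m, ps) =>
      pvLoopB pi_ t
        (if pvGenderIsM pi_ k then
           (if m < v then (v, [k]) else if v = m then (m, ps ++ [k]) else (m, ps))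
         else (m, ps))

def selectMale_alt (point : List (String × Int)) (participate_information : List (String × List (String × String))) : Option String :=
  let s := pvLoopB participate_information point (0, [])
  if s.1 = 0 ∨ s.2 = [] then none
  else some (PySem.Str.join "-" (PySem.List.sorted s.2 (fun x => x) false))

-- ===== PRECONDITION & SPEC =====
-- Pre_ excludes (a) point keys missing from participate_information, where A raises AttributeError
-- (None.get), and (b) duplicate keys in either dict argument, where the assoc-list model of a Python
-- dict (first-vs-last value) is accidental.
def Pre_selectMale (point : List (String × Int)) (participate_information : List (String × List (String × String))) : Prop :=
  (∀ kv ∈ point, (participate_information.lookup kv.1).isSome) ∧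
  (point.map Prod.fst).Nodup ∧ (participate_information.map Prod.fst).Nodup
instance (point : List (String × Int)) (participate_information : List (String × List (String × String))) : Decidable (Pre_selectMale point participate_information) := by unfold Pre_selectMale; infer_instance
def pvWitness_selectMale : (List (String × Int)) × (List (String × List (String × String))) :=
  ([("ann", 3), ("bob", 3)], [("ann", [("Gender", "F")]), ("bob", [("Gender", "M")])])

def Spec_selectMale (point : List (String × Int)) (participate_information : List (String × List (String × String))) (out : Option String) : Prop := out = selectMale_alt point participate_information
instance (point : List (String × Int)) (participate_information : List (String × List (String × String))) (out : Option String) : Decidable (Spec_selectMale point participate_information out) := by unfold Spec_selectMale; infer_instance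

-- ===== CLAIM (what is proved, stated in full; the proofs are below) =====
def Claim_equal_selectMale : Prop := ∀ (point : List (String × Int)) (participate_information : List (String × List (String × String))), Dom_selectMale point participate_information → Pre_selectMale point participate_information → Spec_selectMale point participate_information (selectMale point participate_information)

-- ===== LEMMAS AND PROOFS =====

-- the running max never decreases
theorem pvMaxLoopA_le (pi_ : List (String × List (String × String))) :
    ∀ (l : List (String × Int)) (m : Int), m ≤ pvMaxLoopA pi_ l m := by
  intro l
  induction l with
  | nil => intro m; simp [pvMaxLoopA]
  | cons kv t ih =>
      intro m
      obtain ⟨k, v⟩ := kv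
      simp only [pvMaxLoopA]
      refine le_trans ?_ (ih _)
      split_ifs <;> omega

-- the collecting loop's accumulator factors out
theorem pvPeopleLoopA_acc (pi_ : List (String × List (String × String))) (M : Int) :
    ∀ (l : List (String × Int)) (acc : List String),
      pvPeopleLoopA pi_ M l acc = acc ++ pvPeopleLoopA pi_ M l [] := by
  intro l
  induction l with
  | nil => intro acc; simp [pvPeopleLoopA]
  | cons kv t ih =>
      intro acc
      obtain ⟨k, v⟩ := kv
      simp only [pvPeopleLoopA]
      rw [ih, ih (if v ≠ M then [] else if pvGenderIsM pi_ k then [] ++ [k] else [])]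
      split_ifs <;> simp

-- accumulator rewrites specialised to a singleton / an appended element
theorem pvPeopleLoopA_acc1 (pi_ : List (String × List (String × String))) (M : Int)
    (t : List (String × Int)) (k : String) :
    pvPeopleLoopA pi_ M t [k] = k :: pvPeopleLoopA pi_ M t [] := by
  rw [pvPeopleLoopA_acc]; rfl

-- invariant: B's single pass computes A's max and, at that max, A's collected list
theorem pvLoopB_eq (pi_ : List (String × List (String × String))) :
    ∀ (l : List (String × Int)) (m : Int) (ps : List String),
      pvLoopB pi_ l (m, ps) =
        (pvMaxLoopA pi_ l m,
         (if pvMaxLoopA pi_ l m = m then ps else []) ++ pvPeopleLoopA pi_ (pvMaxLoopA pi_ l m) l []) := by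
  intro l
  induction l with
  | nil => intro m ps; simp [pvLoopB, pvMaxLoopA, pvPeopleLoopA]
  | cons kv t ih =>
      intro m ps
      obtain ⟨k, v⟩ := kv
      by_cases hg : pvGenderIsM pi_ k
      · by_cases h1 : m < v
        · have hM : v ≤ pvMaxLoopA pi_ t v := pvMaxLoopA_le pi_ t v
          have hne : pvMaxLoopA pi_ t v ≠ m := by omega
          simp only [pvLoopB, pvMaxLoopA, pvPeopleLoopA, hg, h1, if_pos]
          rw [ih]
          by_cases he : pvMaxLoopA pi_ t v = v
          · have hv : ¬ (v ≠ pvMaxLoopA pi_ t v) := by omega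
            have hvm : v ≠ m := by omega
            simp [he, hvm, pvPeopleLoopA_acc1]
          · have hv : v ≠ pvMaxLoopA pi_ t v := by omega
            simp [he, hne, hv]
        · by_cases h2 : v = m
          · have hM : m ≤ pvMaxLoopA pi_ t m := pvMaxLoopA_le pi_ t m
            simp only [pvLoopB, pvMaxLoopA, pvPeopleLoopA, hg, h2, if_pos]
            rw [ih]
            by_cases he : pvMaxLoopA pi_ t m = m
            · have hv : ¬ (m ≠ pvMaxLoopA pi_ t m) := by omega
              simp [he, pvPeopleLoopA_acc1]
            · have hv : m ≠ pvMaxLoopA pi_ t m := by omega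
              simp [he, hv]
          · have hM : m ≤ pvMaxLoopA pi_ t m := pvMaxLoopA_le pi_ t m
            simp only [pvLoopB, pvMaxLoopA, pvPeopleLoopA, hg, h1, h2, if_false]
            rw [ih]
            have hv : v ≠ pvMaxLoopA pi_ t m := by omega
            simp [hv]
      · simp only [pvLoopB, pvMaxLoopA, pvPeopleLoopA, hg]
        rw [ih]
        simp

-- ===== VERDICT (by name: the statement is the Claim_ definition above) =====
theorem selectMale_spec : Claim_equal_selectMale := by
  intro point pi_ _hdom _hpre
  unfold Spec_selectMale selectMale selectMale_alt
  rw [pvLoopB_eq]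
  by_cases hnil : point = []
  · subst hnil; simp [pvMaxLoopA, pvPeopleLoopA]
  · simp only [hnil, if_false, ite_self, List.nil_append]
    by_cases hz : pvMaxLoopA pi_ point 0 = 0
    · simp [hz]
    · by_cases hp : pvPeopleLoopA pi_ (pvMaxLoopA pi_ point 0) point [] = []
      · simp [hz, hp]
      · simp [hz, hp]
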